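-- pv_equiv track=rewrite | github.com/vasr-dataset/vasr | dataset/pipeline/B_filter_textual.py | words_lists_intersect
-- ===== SOURCE A (Python) =====
-- def words_lists_intersect(l1, l2, diff_key):
--     if diff_key == 'verb':
--         return False
--     if len(set(l1).intersection(set(l2))) > 0:
--         return True
--     for w1 in l1:
--         if any(w2 in w1 for w2 in l2 if len(w2.split(" ")) > 1):
--             return True
--     for w2 in l2:
--         if any(w1 in w2 for w1 in l1 if len(w1.split(" ")) > 1):
--             return True
--     return False
-- ===== SOURCE B (Python) =====
-- def _hits(w1, l2):
--     # does w1 match some w2: equal, or multi-word substring either way?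
--     for w2 in l2:
--         if w2 == w1:
--             return True
--         if ' ' in w2 and w2 in w1:
--             return True
--         if ' ' in w1 and w1 in w2:
--             return True
--     return False
--
--
-- def _scan(l1, l2):
--     if not l1:
--         return False
--     if _hits(l1[0], l2):
--         return True
--     return _scan(l1[1:], l2)
--
--
-- def words_lists_intersect(l1, l2, diff_key):
--     if diff_key == 'verb':
--         return False
--     return _scan(l1, l2)
-- ===== Notes on version B (the rewrite author's own statement) =====
-- stated objective: simpler
-- what changed: Replaces A's three staged passes (build two sets and intersect, then two directional any-scans gated by len(w.split(' ')) > 1) with a recursive single scan over l1 whose helper checks each word against l2 once for equality or a space-gated substring match in either direction, using the equivalent ' ' in w test instead of splitting.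
import Mathlib
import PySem

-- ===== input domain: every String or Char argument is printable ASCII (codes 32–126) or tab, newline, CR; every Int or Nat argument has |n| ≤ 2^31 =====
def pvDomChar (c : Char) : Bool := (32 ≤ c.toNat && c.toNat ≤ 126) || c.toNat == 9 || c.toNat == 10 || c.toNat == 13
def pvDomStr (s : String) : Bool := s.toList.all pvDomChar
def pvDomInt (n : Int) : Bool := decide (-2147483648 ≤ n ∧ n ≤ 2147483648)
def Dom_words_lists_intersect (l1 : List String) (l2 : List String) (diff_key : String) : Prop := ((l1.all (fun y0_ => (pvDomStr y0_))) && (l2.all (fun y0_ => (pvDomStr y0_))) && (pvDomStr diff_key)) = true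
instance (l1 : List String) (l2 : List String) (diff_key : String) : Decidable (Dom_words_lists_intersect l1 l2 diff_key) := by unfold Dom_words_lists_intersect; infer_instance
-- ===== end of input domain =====

-- B replaces A's three staged passes (set intersection, then two directional any-scans gated by
-- len(split(' ')) > 1) with a recursive single scan over l1 whose helper checks each word against
-- l2 once for equality or a space-gated substring match in either direction (simpler).

-- ===== PORT A =====
def words_lists_intersect (l1 : List String) (l2 : List String) (diff_key : String) : Bool :=
  if diff_key == "verb" then false
  else if PySem.Set.len (PySem.Set.inter (PySem.Set.ofList l1) (PySem.Set.ofList l2)) > 0 then true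
  else if l1.any (fun w1 =>
      l2.any (fun w2 => decide ((PySem.Chars.splitOn w2.toList [' ']).length > 1) && PySem.Str.isIn w2 w1)) then true
  else if l2.any (fun w2 =>
      l1.any (fun w1 => decide ((PySem.Chars.splitOn w1.toList [' ']).length > 1) && PySem.Str.isIn w1 w2)) then true
  else false

-- ===== PORT B =====
-- _hits: one pass over l2 for a single w1 (Python's ' ' in w is PySem.Str.isIn " " w)
def pvHits (w1 : String) (l2 : List String) : Bool :=
  match l2 with
  | [] => false
  | w2 :: rest =>
    if w2 == w1 then true
    else if PySem.Str.isIn " " w2 && PySem.Str.isIn w2 w1 then true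
    else if PySem.Str.isIn " " w1 && PySem.Str.isIn w1 w2 then true
    else pvHits w1 rest

-- _scan: recursion over l1
def pvScan (l1 : List String) (l2 : List String) : Bool :=
  match l1 with
  | [] => false
  | w1 :: rest => if pvHits w1 l2 then true else pvScan rest l2

def words_lists_intersect_alt (l1 : List String) (l2 : List String) (diff_key : String) : Bool :=
  if diff_key == "verb" then false else pvScan l1 l2

-- ===== PRECONDITION & SPEC =====
def Spec_words_lists_intersect (l1 : List String) (l2 : List String) (diff_key : String) (out : Bool) : Prop := out = words_lists_intersect_alt l1 l2 diff_key
instance (l1 : List String) (l2 : List String) (diff_key : String) (out : Bool) : Decidable (Spec_words_lists_intersect l1 l2 diff_key out) := by unfold Spec_words_lists_intersect; infer_instance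

-- ===== CLAIM (what is proved, stated in full; the proofs are below) =====
def Claim_equal_words_lists_intersect : Prop := ∀ (l1 : List String) (l2 : List String) (diff_key : String), Dom_words_lists_intersect l1 l2 diff_key → Spec_words_lists_intersect l1 l2 diff_key (words_lists_intersect l1 l2 diff_key)

-- ===== LEMMAS AND PROOFS =====

theorem splitOn_go_space_len : ∀ (fuel : Nat) (l cur : List Char) (acc : List (List Char)), l.length < fuel →
    (PySem.Chars.splitOn.go [' '] fuel l cur acc).length = acc.length + 1 + l.count ' ' := by
  intro fuel
  induction fuel with
  | zero => intro l cur acc h; omega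
  | succ n ih =>
    intro l cur acc h
    cases l with
    | nil => simp [PySem.Chars.splitOn.go]
    | cons c rest =>
      rw [PySem.Chars.splitOn.go]
      by_cases hc : c = ' '
      · subst hc
        simp only [List.isPrefixOf, beq_self_eq_true, Bool.true_and, if_true]
        rw [ih]
        · simp; omega
        · simp at h ⊢; omega
      · have hb : ((' ' == c && true)) = false := by
          simp; intro hcc; exact hc hcc.symm
        simp only [List.isPrefixOf, hb, Bool.false_eq_true, if_false]
        rw [ih]
        · simp [List.count_cons]
          intro hcc; exact hc hcc
        · simp at h ⊢; omega

-- Python's len(w.split(' ')) > 1 is exactly ' ' in w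
theorem multiword_iff (w : String) :
    ((PySem.Chars.splitOn w.toList [' ']).length > 1) ↔ PySem.Chars.isIn [' '] w.toList = true := by
  rw [PySem.Chars.isIn_iff_infix, List.singleton_infix_iff]
  unfold PySem.Chars.splitOn
  rw [splitOn_go_space_len _ _ _ _ (by omega)]
  rw [← List.count_pos_iff]
  simp

theorem hits_iff (w1 : String) (l2 : List String) :
    pvHits w1 l2 = true ↔ ∃ w2 ∈ l2, w2 = w1
      ∨ (PySem.Chars.isIn [' '] w2.toList = true ∧ PySem.Chars.isIn w2.toList w1.toList = true)
      ∨ (PySem.Chars.isIn [' '] w1.toList = true ∧ PySem.Chars.isIn w1.toList w2.toList = true) := by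
  induction l2 with
  | nil => simp [pvHits]
  | cons w2 rest ih =>
    rw [pvHits]
    split_ifs with h1 h2 h3
    · simp; exact Or.inl (Or.inl (by simpa using h1))
    · simp at h2 ⊢; exact Or.inl (Or.inr (Or.inl h2))
    · simp at h3 ⊢; exact Or.inl (Or.inr (Or.inr h3))
    · rw [ih]
      constructor
      · rintro ⟨w, hw, hc⟩; exact ⟨w, List.mem_cons_of_mem _ hw, hc⟩
      · rintro ⟨w, hw, hc⟩
        rcases List.mem_cons.mp hw with rfl | hw'
        · exfalso
          rcases hc with rfl | hc | hc
          · exact h1 (by simp)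
          · exact h2 (by simp [hc.1, hc.2])
          · exact h3 (by simp [hc.1, hc.2])
        · exact ⟨w, hw', hc⟩

theorem scan_iff (l1 l2 : List String) :
    pvScan l1 l2 = true ↔ ∃ w1 ∈ l1, pvHits w1 l2 = true := by
  induction l1 with
  | nil => simp [pvScan]
  | cons w1 rest ih =>
    rw [pvScan]
    split_ifs with h
    · simp; exact Or.inl h
    · rw [ih]
      constructor
      · rintro ⟨w, hw, hc⟩; exact ⟨w, List.mem_cons_of_mem _ hw, hc⟩
      · rintro ⟨w, hw, hc⟩
        rcases List.mem_cons.mp hw with rfl | hw'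
        · exact absurd hc (by simpa using h)
        · exact ⟨w, hw', hc⟩

theorem words_lists_intersect_eq_alt (l1 l2 : List String) (dk : String) :
    words_lists_intersect l1 l2 dk = words_lists_intersect_alt l1 l2 dk := by
  unfold words_lists_intersect words_lists_intersect_alt
  by_cases h : dk == "verb"
  · simp [h]
  · simp only [h, Bool.false_eq_true, if_false]
    rw [Bool.eq_iff_iff, scan_iff]
    simp only [hits_iff, multiword_iff, PySem.Set.len, PySem.Set.inter,
      PySem.Set.contains_eq_listContains, List.contains_eq_mem, Int.natCast_pos,
      List.length_filter_pos_iff, PySem.Set.mem_ofList, decide_eq_true_eq, List.any_eq_true,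
      Bool.and_eq_true, PySem.Str.isIn_eq, gt_iff_lt]
    constructor
    · intro h
      split_ifs at h with h1 h2 h3
      · obtain ⟨x, hx1, hx2⟩ := h1
        exact ⟨x, hx1, x, hx2, Or.inl rfl⟩
      · obtain ⟨w1, hw1, w2, hw2, hc, hin⟩ := h2
        exact ⟨w1, hw1, w2, hw2, Or.inr (Or.inl ⟨hc, hin⟩)⟩
      · obtain ⟨w2, hw2, w1, hw1, hc, hin⟩ := h3
        exact ⟨w1, hw1, w2, hw2, Or.inr (Or.inr ⟨hc, hin⟩)⟩
    · rintro ⟨w1, hw1, w2, hw2, hcase⟩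
      split_ifs with h1 h2 h3
      · trivial
      · trivial
      · trivial
      · exfalso
        rcases hcase with heq | ⟨hs, hin⟩ | ⟨hs, hin⟩
        · exact h1 ⟨w1, hw1, heq ▸ hw2⟩
        · exact h2 ⟨w1, hw1, w2, hw2, hs, hin⟩
        · exact h3 ⟨w2, hw2, w1, hw1, hs, hin⟩

-- ===== VERDICT (by name: the statement is the Claim_ definition above) =====
theorem words_lists_intersect_spec : Claim_equal_words_lists_intersect := by
  intro l1 l2 dk _
  exact words_lists_intersect_eq_alt l1 l2 dk
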